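-- pv_equiv track=rewrite | github.com/mytherapy-coding/coding | codewars/fundamentals/jaden_casing_strings/jaden_casing_strings.py | to_jaden_case4
-- ===== SOURCE A (Python) =====
-- def to_jaden_case4(s: str) -> str:
--     res: list[str] = []
--     for c in s:
--         if c.isspace():
--             res.append(c)
--         elif not res or res[-1].isspace():
--             res.append(c.upper())
--         else:
--             res.append(c.lower())
--
--     return "".join(res)
-- ===== SOURCE B (Python) =====
-- def to_jaden_case4(s: str) -> str:
--     out: list[str] = []
--     i, n = 0, len(s)
--     while i < n:
--         key = s[i].isspace()
--         j = i + 1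
--         while j < n and s[j].isspace() == key:
--             j += 1
--         run = s[i:j]
--         out.append(run if key else run[0].upper() + run[1:].lower())
--         i = j
--     return "".join(out)
-- ===== Notes on version B (the rewrite author's own statement) =====
-- stated objective: alternative
-- what changed: B splits the string into maximal runs of same isspace-key and transforms each word run as run[0].upper()+run[1:].lower(), instead of A's per-character loop that inspects the last appended character (res[-1].isspace()) to decide the case.
import Mathlib
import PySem

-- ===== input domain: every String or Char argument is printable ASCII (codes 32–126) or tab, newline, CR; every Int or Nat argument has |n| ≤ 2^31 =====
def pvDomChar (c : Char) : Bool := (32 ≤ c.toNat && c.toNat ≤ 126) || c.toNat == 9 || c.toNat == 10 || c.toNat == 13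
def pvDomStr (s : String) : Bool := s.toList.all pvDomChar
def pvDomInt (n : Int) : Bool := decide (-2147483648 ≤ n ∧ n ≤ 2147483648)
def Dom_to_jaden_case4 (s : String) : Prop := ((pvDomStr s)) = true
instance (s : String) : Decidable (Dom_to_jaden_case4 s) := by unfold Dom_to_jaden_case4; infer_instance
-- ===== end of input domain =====

-- B groups the string into maximal runs of equal isspace-key and transforms each word run
-- as head.upper ++ tail.lower, instead of A's per-character loop keyed on res[-1].isspace();
-- objective: alternative decomposition (same O(n) cost).

-- ===== PORT A =====
-- res holds the appended one-character strings (c, c.upper(), c.lower() are single chars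
-- on the ASCII domain), so it is represented as List Char; "".join(res) = String.mk res.
def to_jaden_case4 (s : String) : String :=
  String.mk (s.toList.foldl (fun res c =>
    if PySem.Chars.isspace c then res ++ [c]
    else if (match res.getLast? with
             | none => true                              -- "not res"
             | some d => PySem.Chars.isspace d) then     -- "res[-1].isspace()"
      res ++ [PySem.Chars.upperChar c]
    else
      res ++ [PySem.Chars.lowerChar c]) [])

-- ===== PORT B =====
-- the inner while loop: take the maximal prefix of cs with the same isspace-key as c
def jadenRuns (l : List Char) : List (List Char) :=
  match l with
  | [] => []
  | c :: cs =>
    (c :: cs.takeWhile (fun d => PySem.Chars.isspace d == PySem.Chars.isspace c)) ::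
      jadenRuns (cs.dropWhile (fun d => PySem.Chars.isspace d == PySem.Chars.isspace c))
termination_by l.length
decreasing_by
  simp only [List.length_cons]
  exact Nat.lt_succ_of_le (List.length_dropWhile_le _ _)

-- run if key else run[0].upper() + run[1:].lower()
def jadenPiece (r : List Char) : List Char :=
  match r with
  | [] => []
  | c :: cs =>
    if PySem.Chars.isspace c then c :: cs
    else PySem.Chars.upperChar c :: PySem.Chars.lower cs

def to_jaden_case4_alt (s : String) : String :=
  String.mk (((jadenRuns s.toList).map jadenPiece).flatten)

-- ===== PRECONDITION & SPEC =====
def Spec_to_jaden_case4 (s : String) (out : String) : Prop := out = to_jaden_case4_alt s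
instance (s : String) (out : String) : Decidable (Spec_to_jaden_case4 s out) := by unfold Spec_to_jaden_case4; infer_instance

-- ===== CLAIM (what is proved, stated in full; the proofs are below) =====
def Claim_equal_to_jaden_case4 : Prop := ∀ (s : String), Dom_to_jaden_case4 s → Spec_to_jaden_case4 s (to_jaden_case4 s)

-- ===== LEMMAS AND PROOFS =====

-- the per-character state machine both programs implement; b = "at start of input or previous char is space"
def jadenGo (b : Bool) : List Char → List Char
  | [] => []
  | c :: cs =>
    if PySem.Chars.isspace c then c :: jadenGo true cs
    else (if b then PySem.Chars.upperChar c else PySem.Chars.lowerChar c) :: jadenGo false cs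

theorem isspace_upperChar (c : Char) :
    PySem.Chars.isspace (PySem.Chars.upperChar c) = PySem.Chars.isspace c := by
  unfold PySem.Chars.upperChar PySem.Chars.islower
  split
  · rename_i h
    simp only [decide_eq_true_eq, Bool.and_eq_true] at h
    have h1 : 97 ≤ c.toNat := h.1
    have h2 : c.toNat ≤ 122 := h.2
    have hv : (Char.ofNat (c.toNat - 32)).toNat = c.toNat - 32 := by
      rw [Char.toNat_ofNat, if_pos]
      exact Or.inl (by omega)
    have hfc : PySem.Chars.isspace c = false := by
      unfold PySem.Chars.isspace
      simp only [Bool.or_eq_false_iff, Bool.and_eq_false_iff, decide_eq_false_iff_not]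
      omega
    have hfo : PySem.Chars.isspace (Char.ofNat (c.toNat - 32)) = false := by
      unfold PySem.Chars.isspace
      simp only [hv, Bool.or_eq_false_iff, Bool.and_eq_false_iff, decide_eq_false_iff_not]
      omega
    rw [hfc, hfo]
  · rfl

theorem isspace_lowerChar (c : Char) :
    PySem.Chars.isspace (PySem.Chars.lowerChar c) = PySem.Chars.isspace c := by
  unfold PySem.Chars.lowerChar PySem.Chars.isupper
  split
  · rename_i h
    simp only [decide_eq_true_eq, Bool.and_eq_true] at h
    have h1 : 65 ≤ c.toNat := h.1
    have h2 : c.toNat ≤ 90 := h.2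
    have hv : (Char.ofNat (c.toNat + 32)).toNat = c.toNat + 32 := by
      rw [Char.toNat_ofNat, if_pos]
      exact Or.inl (by omega)
    have hfc : PySem.Chars.isspace c = false := by
      unfold PySem.Chars.isspace
      simp only [Bool.or_eq_false_iff, Bool.and_eq_false_iff, decide_eq_false_iff_not]
      omega
    have hfo : PySem.Chars.isspace (Char.ofNat (c.toNat + 32)) = false := by
      unfold PySem.Chars.isspace
      simp only [hv, Bool.or_eq_false_iff, Bool.and_eq_false_iff, decide_eq_false_iff_not]
      omega
    rw [hfc, hfo]
  · rfl

-- the flag A's loop reads off res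
def jadenFlag (res : List Char) : Bool :=
  match res.getLast? with
  | none => true
  | some d => PySem.Chars.isspace d

theorem jadenFlag_concat (res : List Char) (c : Char) :
    jadenFlag (res ++ [c]) = PySem.Chars.isspace c := by
  simp [jadenFlag, List.getLast?_concat]

-- A's fold, characterized by the state machine
theorem foldA_eq_go (l : List Char) : ∀ (res : List Char),
    l.foldl (fun res c =>
      if PySem.Chars.isspace c then res ++ [c]
      else if (match res.getLast? with
               | none => true
               | some d => PySem.Chars.isspace d) then res ++ [PySem.Chars.upperChar c]
      else res ++ [PySem.Chars.lowerChar c]) res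
    = res ++ jadenGo (jadenFlag res) l := by
  induction l with
  | nil => intro res; simp [jadenGo]
  | cons c cs ih =>
    intro res
    by_cases hc : PySem.Chars.isspace c = true
    · rw [List.foldl_cons, if_pos hc, ih, jadenFlag_concat, hc]
      simp [jadenGo, hc]
    · have hc' : PySem.Chars.isspace c = false := by simpa using hc
      by_cases hb : jadenFlag res = true
      · have hmatch : (match res.getLast? with
            | none => true
            | some d => PySem.Chars.isspace d) = true := hb
        rw [List.foldl_cons]
        simp only [hc', Bool.false_eq_true, if_false, hmatch, if_true]
        rw [ih, jadenFlag_concat, isspace_upperChar, hc']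
        simp [jadenGo, hc', hb]
      · have hb' : jadenFlag res = false := by simpa using hb
        have hmatch : (match res.getLast? with
            | none => true
            | some d => PySem.Chars.isspace d) = false := hb'
        rw [List.foldl_cons]
        simp only [hc', Bool.false_eq_true, if_false, hmatch]
        rw [ih, jadenFlag_concat, isspace_lowerChar, hc']
        simp [jadenGo, hc', hb']

-- go walks through a run of spaces unchanged
theorem go_spaces (r : List Char) (rest : List Char)
    (h : ∀ d ∈ r, PySem.Chars.isspace d = true) :
    jadenGo true (r ++ rest) = r ++ jadenGo true rest := by
  induction r with
  | nil => rfl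
  | cons d ds ih =>
    have hd : PySem.Chars.isspace d = true := h d (by simp)
    simp [jadenGo, hd, ih (fun x hx => h x (by simp [hx]))]

-- go walks through a run of non-spaces lowercasing them
theorem go_word (r : List Char) (rest : List Char)
    (h : ∀ d ∈ r, PySem.Chars.isspace d = false) :
    jadenGo false (r ++ rest) = PySem.Chars.lower r ++ jadenGo false rest := by
  induction r with
  | nil => rfl
  | cons d ds ih =>
    have hd : PySem.Chars.isspace d = false := h d (by simp)
    simp [jadenGo, hd, PySem.Chars.lower, ih (fun x hx => h x (by simp [hx]))]

-- after a word run, the next char (if any) is a space, so the flag value is irrelevant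
theorem go_false_eq_true_of_space_head (rest : List Char)
    (h : ∀ d, rest.head? = some d → PySem.Chars.isspace d = true) :
    jadenGo false rest = jadenGo true rest := by
  cases rest with
  | nil => rfl
  | cons d ds =>
    have hd := h d rfl
    simp [jadenGo, hd]

-- B's runs/pieces flatten to the state machine's output
theorem flatten_runs_eq_go (l : List Char) :
    ((jadenRuns l).map jadenPiece).flatten = jadenGo true l := by
  induction l using jadenRuns.induct with
  | case1 => simp [jadenRuns, jadenGo]
  | case2 c cs ih =>
    have hsplit : cs.takeWhile (fun d => PySem.Chars.isspace d == PySem.Chars.isspace c)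
        ++ cs.dropWhile (fun d => PySem.Chars.isspace d == PySem.Chars.isspace c) = cs :=
      List.takeWhile_append_dropWhile
    have htake : ∀ d ∈ cs.takeWhile (fun d => PySem.Chars.isspace d == PySem.Chars.isspace c),
        PySem.Chars.isspace d = PySem.Chars.isspace c := by
      intro d hd
      simpa using List.mem_takeWhile_imp hd
    have hdrop : ∀ d, (cs.dropWhile (fun d => PySem.Chars.isspace d == PySem.Chars.isspace c)).head? = some d →
        PySem.Chars.isspace d ≠ PySem.Chars.isspace c := by
      intro d hd
      have := List.head?_dropWhile_not (fun d => PySem.Chars.isspace d == PySem.Chars.isspace c) cs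
      rw [hd] at this
      simpa using this
    by_cases hc : PySem.Chars.isspace c = true
    · -- space run
      have hpiece : jadenPiece (c :: cs.takeWhile (fun d => PySem.Chars.isspace d == PySem.Chars.isspace c))
          = c :: cs.takeWhile (fun d => PySem.Chars.isspace d == PySem.Chars.isspace c) := by
        simp [jadenPiece, hc]
      have hgo : jadenGo true (c :: cs) = c :: jadenGo true cs := by
        simp [jadenGo, hc]
      rw [jadenRuns]
      simp only [List.map_cons, List.flatten_cons, ih, hpiece, hgo, List.cons_append]
      congr 1
      conv_rhs => rw [← hsplit,
        go_spaces _ _ (fun d hd => by rw [htake d hd, hc])]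
    · -- word run
      have hc' : PySem.Chars.isspace c = false := by simpa using hc
      have hpiece : jadenPiece (c :: cs.takeWhile (fun d => PySem.Chars.isspace d == PySem.Chars.isspace c))
          = PySem.Chars.upperChar c ::
            PySem.Chars.lower (cs.takeWhile (fun d => PySem.Chars.isspace d == PySem.Chars.isspace c)) := by
        simp [jadenPiece, hc']
      have hgo : jadenGo true (c :: cs) = PySem.Chars.upperChar c :: jadenGo false cs := by
        simp [jadenGo, hc']
      rw [jadenRuns]
      simp only [List.map_cons, List.flatten_cons, ih, hpiece, hgo, List.cons_append]
      congr 1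
      conv_rhs => rw [← hsplit,
        go_word _ _ (fun d hd => by rw [htake d hd, hc'])]
      congr 1
      refine (go_false_eq_true_of_space_head _ ?_).symm
      intro d hd
      have := hdrop d hd
      rw [hc'] at this
      simpa using this

-- ===== VERDICT (by name: the statement is the Claim_ definition above) =====
theorem to_jaden_case4_spec : Claim_equal_to_jaden_case4 := by
  intro s _
  unfold Spec_to_jaden_case4 to_jaden_case4 to_jaden_case4_alt
  rw [flatten_runs_eq_go, foldA_eq_go]
  rfl
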